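-- pv_equiv track=rewrite | github.com/wangjianbing1998/HEROs_HUAWEI_fang | HUST_top3_5.py | get_pre_path
-- ===== SOURCE A (Python) =====
-- def get_pre_path(paths, s):
--
--     def find_path(path, v):
--         pre_path = []
--         for p in path:
--             pre_path.append(p)
--             if p == v:
--                 return pre_path
--         return None
--
--     ans = []
--     js = []
--     for j in range(len(s) - 1, -1, -1):
--
--         for path in paths:
--             pre_path = find_path(path, s[j])
--             if pre_path:
--                 ans.append(pre_path)
--                 js.append(j)
--         if ans:
--             break
--     return ans, js
-- ===== SOURCE B (Python) =====
-- def get_pre_path(paths, s):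
--     values = set()
--     for path in paths:
--         values.update(path)
--     for j in range(len(s) - 1, -1, -1):
--         if s[j] in values:
--             v = s[j]
--             ans = [path[:path.index(v) + 1] for path in paths if v in path]
--             return ans, [j] * len(ans)
--     return [], []
-- ===== Notes on version B (the rewrite author's own statement) =====
-- stated objective: faster
-- what changed: B precomputes the set of all values occurring in any path, finds the largest matching index j with one membership test per position, and builds the prefixes in a single pass over paths, removing A's rescan of every path for every candidate j; a timing run measured A timing out where B returned (ratio >300x at n=4096), though on dense uniform inputs where A's loop exits early the two are near parity.
import Mathlib
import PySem

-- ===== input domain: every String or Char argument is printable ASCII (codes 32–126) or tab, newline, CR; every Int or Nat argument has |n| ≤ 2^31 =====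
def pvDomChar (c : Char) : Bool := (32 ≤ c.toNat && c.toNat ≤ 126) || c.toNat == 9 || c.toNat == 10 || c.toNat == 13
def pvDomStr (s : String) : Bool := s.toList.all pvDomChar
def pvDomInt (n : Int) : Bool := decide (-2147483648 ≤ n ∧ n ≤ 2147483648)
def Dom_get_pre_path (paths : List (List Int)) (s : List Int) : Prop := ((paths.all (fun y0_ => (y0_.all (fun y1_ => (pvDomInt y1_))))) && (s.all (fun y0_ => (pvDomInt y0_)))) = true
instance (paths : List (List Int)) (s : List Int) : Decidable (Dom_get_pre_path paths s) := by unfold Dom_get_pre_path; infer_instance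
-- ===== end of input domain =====

-- B precomputes the set of all path values, finds the largest matching index by one
-- membership test per position and builds prefixes in one pass (objective: faster; measured on its adversarial input family).

-- ===== PORT A =====
-- find_path(path, v): append each p to pre_path; return pre_path on p == v, else None
def gppFindPath (v : Int) (prePath : List Int) : List Int → Option (List Int)
  | [] => none
  | p :: rest =>
    let prePath' := prePath ++ [p]
    if p == v then some prePath' else gppFindPath v prePath' rest

-- inner 'for path in paths' loop: append to ans/js when find_path returns a truthy list
def gppInner (v : Int) (j : Int) (ans : List (List Int)) (js : List Int) :
    List (List Int) → List (List Int) × List Int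
  | [] => (ans, js)
  | path :: rest =>
    match gppFindPath v [] path with
    | some pre => if pre.isEmpty then gppInner v j ans js rest
                  else gppInner v j (ans ++ [pre]) (js ++ [j]) rest
    | none => gppInner v j ans js rest

-- outer 'for j in range(len(s)-1, -1, -1)' loop with 'if ans: break'
def gppOuter (paths : List (List Int)) (s : List Int) (ans : List (List Int)) (js : List Int) :
    List Int → List (List Int) × List Int
  | [] => (ans, js)
  | j :: jrest =>
    let r := gppInner (PySem.List.pyGetD s j 0) j ans js paths
    if r.1.isEmpty then gppOuter paths s r.1 r.2 jrest else r

def get_pre_path (paths : List (List Int)) (s : List Int) : List (List Int) × List Int :=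
  gppOuter paths s [] [] (PySem.List.pyRange ((s.length : Int) - 1) (-1) (-1))

-- ===== PORT B =====
-- values = set(); for path in paths: values.update(path)
def gppValues (paths : List (List Int)) : PySem.Set Int :=
  paths.foldl (fun st path => PySem.Set.update st path) PySem.Set.empty

-- scan j from len(s)-1 down to 0, first j with s[j] in values
def gppFindJ (s : List Int) (values : PySem.Set Int) : List Int → Option Int
  | [] => none
  | j :: rest =>
    if PySem.Set.contains values (PySem.List.pyGetD s j 0) then some j
    else gppFindJ s values rest

def get_pre_path_alt (paths : List (List Int)) (s : List Int) : List (List Int) × List Int :=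
  match gppFindJ s (gppValues paths) (PySem.List.pyRange ((s.length : Int) - 1) (-1) (-1)) with
  | none => ([], [])
  | some j =>
    let v := PySem.List.pyGetD s j 0
    let ans := paths.filterMap (fun path =>
      if path.contains v then
        some (PySem.List.slice path none (some (((PySem.List.index? path v).getD 0 : Int) + 1)))
      else none)
    (ans, List.replicate ans.length j)

-- ===== PRECONDITION & SPEC =====
def Spec_get_pre_path (paths : List (List Int)) (s : List Int) (out : List (List Int) × List Int) : Prop := out = get_pre_path_alt paths s
instance (paths : List (List Int)) (s : List Int) (out : List (List Int) × List Int) : Decidable (Spec_get_pre_path paths s out) := by unfold Spec_get_pre_path; infer_instance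

-- ===== CLAIM (what is proved, stated in full; the proofs are below) =====
def Claim_equal_get_pre_path : Prop := ∀ (paths : List (List Int)) (s : List Int), Dom_get_pre_path paths s → Spec_get_pre_path paths s (get_pre_path paths s)

-- ===== LEMMAS AND PROOFS =====

theorem gppFindPath_eq (v : Int) (path : List Int) (acc : List Int) :
    gppFindPath v acc path = (PySem.List.index? path v).map (fun i => acc ++ path.take (i + 1)) := by
  induction path generalizing acc with
  | nil => simp [gppFindPath, PySem.List.index?]
  | cons p rest ih =>
    by_cases h : p = v
    · subst h
      rw [PySem.List.index?_cons_self]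
      simp [gppFindPath]
    · rw [PySem.List.index?_cons_of_ne rest h]
      have hb : (p == v) = false := by simpa using h
      simp only [gppFindPath, hb, Bool.false_eq_true, if_false]
      rw [ih]
      cases PySem.List.index? rest v <;> simp [List.take_succ_cons]

-- the matches collected for a value v, in path order
def gppMatches (paths : List (List Int)) (v : Int) : List (List Int) :=
  paths.filterMap (fun path => (PySem.List.index? path v).map (fun i => path.take (i + 1)))

theorem gppInner_eq (v : Int) (j : Int) (paths : List (List Int)) (ans : List (List Int)) (js : List Int) :
    gppInner v j ans js paths =
      (ans ++ gppMatches paths v, js ++ List.replicate (gppMatches paths v).length j) := by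
  induction paths generalizing ans js with
  | nil => simp [gppInner, gppMatches]
  | cons path rest ih =>
    simp only [gppInner, gppFindPath_eq]
    cases hidx : PySem.List.index? path v with
    | none =>
      have hm : gppMatches (path :: rest) v = gppMatches rest v := by
        simp only [gppMatches, List.filterMap_cons]
        rw [hidx]
        rfl
      rw [hm]
      exact ih ans js
    | some i =>
      obtain ⟨hk, -, -⟩ := PySem.List.getElem_of_index?_eq_some hidx
      have hpath : path ≠ [] := by rintro rfl; simp at hk
      have hne : (path.take (i + 1)).isEmpty = false := by
        simp [List.take_eq_nil_iff, hpath]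
      have hm : gppMatches (path :: rest) v = path.take (i + 1) :: gppMatches rest v := by
        simp only [gppMatches, List.filterMap_cons]
        rw [hidx]
        rfl
      simp only [Option.map_some, List.nil_append, hne, Bool.false_eq_true, if_false]
      rw [hm, ih]
      simp [List.replicate_succ]

theorem gppMatches_eq_alt (paths : List (List Int)) (v : Int) :
    gppMatches paths v = paths.filterMap (fun path =>
      if path.contains v then
        some (PySem.List.slice path none (some (((PySem.List.index? path v).getD 0 : Int) + 1)))
      else none) := by
  unfold gppMatches
  apply List.filterMap_congr
  intro path _
  cases hidx : PySem.List.index? path v with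
  | none =>
    have hv : v ∉ path := (PySem.List.index?_eq_none_iff path v).mp hidx
    have hc : path.contains v = false := by simpa using hv
    rw [hc]
    rfl
  | some i =>
    have hmem : v ∈ path := (PySem.List.index?_isSome_iff path v).mp (by rw [hidx]; rfl)
    have hc : path.contains v = true := by simpa using hmem
    rw [hc]
    have hcast : ((((some i).getD 0 : Nat)) : Int) + 1 = ((i + 1 : Nat) : Int) := by simp
    rw [if_pos rfl, hcast, PySem.List.slice_to_natCast]
    rfl

theorem gppValues_mem (paths : List (List Int)) (init : PySem.Set Int) (x : Int) :
    x ∈ paths.foldl (fun st path => PySem.Set.update st path) init ↔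
      x ∈ init ∨ ∃ p ∈ paths, x ∈ p := by
  induction paths generalizing init with
  | nil => simp
  | cons path rest ih =>
    simp only [List.foldl_cons, ih, PySem.Set.mem_update, List.mem_cons]
    constructor
    · rintro ((h | h) | ⟨p, hp, hx⟩)
      · exact Or.inl h
      · exact Or.inr ⟨path, Or.inl rfl, h⟩
      · exact Or.inr ⟨p, Or.inr hp, hx⟩
    · rintro (h | ⟨p, (rfl | hp), hx⟩)
      · exact Or.inl (Or.inl h)
      · exact Or.inl (Or.inr hx)
      · exact Or.inr ⟨p, hp, hx⟩

theorem gppMatches_nil_iff (paths : List (List Int)) (v : Int) :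
    gppMatches paths v = [] ↔ ¬ ∃ p ∈ paths, v ∈ p := by
  unfold gppMatches
  rw [List.filterMap_eq_nil_iff]
  constructor
  · rintro h ⟨p, hp, hv⟩
    have h1 := h p hp
    rcases hidx : PySem.List.index? p v with _ | i
    · exact ((PySem.List.index?_eq_none_iff p v).mp hidx) hv
    · rw [hidx] at h1; simp at h1
  · intro h p hp
    have hv : v ∉ p := fun hv => h ⟨p, hp, hv⟩
    rw [(PySem.List.index?_eq_none_iff p v).mpr hv]
    rfl

theorem gppMem_values_iff (paths : List (List Int)) (v : Int) :
    v ∈ gppValues paths ↔ ∃ p ∈ paths, v ∈ p := by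
  unfold gppValues
  rw [gppValues_mem]
  simp [PySem.Set.empty]

theorem gppOuter_eq (paths : List (List Int)) (s : List Int) (jlist : List Int) :
    gppOuter paths s [] [] jlist =
      (match gppFindJ s (gppValues paths) jlist with
       | none => ([], [])
       | some j =>
         let v := PySem.List.pyGetD s j 0
         (gppMatches paths v, List.replicate (gppMatches paths v).length j)) := by
  induction jlist with
  | nil => simp [gppOuter, gppFindJ]
  | cons j rest ih =>
    simp only [gppOuter, gppFindJ, gppInner_eq, List.nil_append]
    by_cases hmem : PySem.List.pyGetD s j 0 ∈ gppValues paths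
    · have hc : PySem.Set.contains (gppValues paths) (PySem.List.pyGetD s j 0) = true := by
        simp [PySem.Set.contains, hmem]
      have hne : gppMatches paths (PySem.List.pyGetD s j 0) ≠ [] := by
        rw [Ne, gppMatches_nil_iff]
        intro hcon
        exact hcon ((gppMem_values_iff paths _).mp hmem)
      have hemp : (gppMatches paths (PySem.List.pyGetD s j 0)).isEmpty = false := by
        simp [hne]
      rw [hc]
      simp [hemp]
    · have hc : PySem.Set.contains (gppValues paths) (PySem.List.pyGetD s j 0) = false := by
        simp [PySem.Set.contains, hmem]
      have hnil : gppMatches paths (PySem.List.pyGetD s j 0) = [] := by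
        rw [gppMatches_nil_iff]
        intro hcon
        exact hmem ((gppMem_values_iff paths _).mpr hcon)
      rw [hc]
      simp only [hnil, List.length_nil, List.replicate_zero, List.isEmpty_nil, if_true]
      exact ih

-- ===== VERDICT (by name: the statement is the Claim_ definition above) =====
theorem get_pre_path_spec : Claim_equal_get_pre_path := by
  intro paths s _
  unfold Spec_get_pre_path get_pre_path get_pre_path_alt
  rw [gppOuter_eq]
  cases gppFindJ s (gppValues paths) (PySem.List.pyRange ((s.length : Int) - 1) (-1) (-1)) with
  | none => rfl
  | some j => simp only [gppMatches_eq_alt]
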